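-- pv_equiv track=rewrite | github.com/abeaufays/AdventOfCode | 2024/9/part2.py | find_first_empty_space_before
-- ===== SOURCE A (Python) =====
-- EMPTY = -1
--
-- def find_first_empty_space_before(
--     file_map: list[int], size: int, before: int
-- ) -> tuple[int, int] | None:
--     for idx, file in enumerate(file_map):
--         if idx >= before:
--             return None
--         if file == EMPTY:
--             chunk = file_map[idx : idx + size]
--             if all(space == EMPTY for space in chunk) and len(chunk) == size:
--                 return (idx, idx + size - 1)
--     return None
-- ===== SOURCE B (Python) =====
-- EMPTY = -1
--
-- def find_first_empty_space_before(file_map, size, before):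
--     # Alternative algorithm: precompute, in one backward pass, the length of the empty run starting at
--     # each index; then scan for the first start index with a long-enough run.
--     if size < 0:
--         return None
--     n = len(file_map)
--     run = [0] * (n + 1)
--     for i in range(n - 1, -1, -1):
--         run[i] = run[i + 1] + 1 if file_map[i] == EMPTY else 0
--     for idx in range(n):
--         if idx >= before:
--             return None
--         if run[idx] > 0 and run[idx] >= size:
--             return (idx, idx + size - 1)
--     return None
-- ===== Notes on version B (the rewrite author's own statement) =====
-- stated objective: alternative
-- what changed: Replaced the per-index slice-and-check (each empty index re-scans up to `size` elements) by one backward pass that precomputes the empty-run length starting at every index, so the forward scan tests each candidate in O(1); worst-case O(n) vs A's O(before*size), though both exit early on typical inputs.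
import Mathlib
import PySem

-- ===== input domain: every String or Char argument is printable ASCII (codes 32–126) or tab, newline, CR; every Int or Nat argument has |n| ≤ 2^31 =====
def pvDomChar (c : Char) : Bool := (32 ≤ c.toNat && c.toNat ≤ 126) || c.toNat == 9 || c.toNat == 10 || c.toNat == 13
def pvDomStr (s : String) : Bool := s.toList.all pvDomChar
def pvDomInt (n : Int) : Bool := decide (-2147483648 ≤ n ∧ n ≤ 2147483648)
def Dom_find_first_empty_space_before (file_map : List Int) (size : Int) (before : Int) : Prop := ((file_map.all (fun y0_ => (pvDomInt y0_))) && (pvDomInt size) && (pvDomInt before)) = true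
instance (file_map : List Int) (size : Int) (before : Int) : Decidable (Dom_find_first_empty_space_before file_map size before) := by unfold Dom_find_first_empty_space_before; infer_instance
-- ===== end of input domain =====

-- B precomputes empty-run lengths in one backward pass and scans them, instead of A's per-index slice re-scan (alternative algorithm, same results).

-- ===== PORT A =====
-- the enumerate loop: rest = file_map.drop idx, full list kept for the slice
def pvA_loop (file_map : List Int) (size before : Int) : List Int → Int → Option (List Int)
  | [], _ => none
  | f :: rest, idx =>
    if before ≤ idx then none
    else if f = -1 then
      let chunk := PySem.List.slice file_map (some idx) (some (idx + size))
      if (chunk.all (fun space => space == (-1 : Int))) = true ∧ (chunk.length : Int) = size then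
        some [idx, idx + size - 1]
      else pvA_loop file_map size before rest (idx + 1)
    else pvA_loop file_map size before rest (idx + 1)

def find_first_empty_space_before (file_map : List Int) (size : Int) (before : Int) : Option (List Int) :=
  pvA_loop file_map size before file_map 0

-- ===== PORT B =====
-- backward pass: run[i] = run[i+1] + 1 if file_map[i] == EMPTY else 0 (table has n+1 entries, last 0)
def pvB_run : List Int → List Int
  | [] => [0]
  | v :: rest =>
    let r := pvB_run rest
    (if v = -1 then r.head?.getD 0 + 1 else 0) :: r

-- forward scan over the run table
def pvB_scan (size before : Int) : List Int → Int → Option (List Int)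
  | [], _ => none
  | r :: rest, idx =>
    if before ≤ idx then none
    else if 0 < r ∧ size ≤ r then some [idx, idx + size - 1]
    else pvB_scan size before rest (idx + 1)

def find_first_empty_space_before_alt (file_map : List Int) (size : Int) (before : Int) : Option (List Int) :=
  if size < 0 then none
  else pvB_scan size before (pvB_run file_map) 0

-- ===== PRECONDITION & SPEC =====
def Spec_find_first_empty_space_before (file_map : List Int) (size : Int) (before : Int) (out : Option (List Int)) : Prop := out = find_first_empty_space_before_alt file_map size before
instance (file_map : List Int) (size : Int) (before : Int) (out : Option (List Int)) : Decidable (Spec_find_first_empty_space_before file_map size before out) := by unfold Spec_find_first_empty_space_before; infer_instance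

-- ===== CLAIM (what is proved, stated in full; the proofs are below) =====
def Claim_equal_find_first_empty_space_before : Prop := ∀ (file_map : List Int) (size : Int) (before : Int), Dom_find_first_empty_space_before file_map size before → Spec_find_first_empty_space_before file_map size before (find_first_empty_space_before file_map size before)

-- ===== LEMMAS AND PROOFS =====

-- length of the empty run at the head of l (the value pvB_run puts first)
def pvRunLen : List Int → Int
  | [] => 0
  | v :: rest => if v = -1 then pvRunLen rest + 1 else 0

lemma pvRunLen_nonneg (l : List Int) : 0 ≤ pvRunLen l := by
  induction l with
  | nil => simp [pvRunLen]
  | cons v rest ih => simp only [pvRunLen]; split <;> omega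

lemma pvB_run_head (l : List Int) : (pvB_run l).head?.getD 0 = pvRunLen l := by
  induction l with
  | nil => simp [pvB_run, pvRunLen]
  | cons v rest ih =>
    simp only [pvB_run, pvRunLen, List.head?_cons, Option.getD_some]
    split <;> simp [ih]

-- A's chunk test on the first k elements equals "the empty run is at least k long"
lemma pvRunLen_ge_iff (l : List Int) (k : Nat) :
    (((l.take k).all (fun space => space == (-1 : Int))) = true ∧ ((l.take k).length : Int) = (k : Int))
      ↔ (k : Int) ≤ pvRunLen l := by
  induction l generalizing k with
  | nil =>
    simp only [List.take_nil, List.all_nil, List.length_nil, pvRunLen]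
    constructor
    · rintro ⟨-, h⟩; omega
    · intro h; exact ⟨by simp, by omega⟩
  | cons v rest ih =>
    cases k with
    | zero =>
      have h0 := pvRunLen_nonneg (v :: rest)
      simp only [List.take_zero, List.all_nil, List.length_nil]
      constructor
      · intro _; simpa using h0
      · intro _; exact ⟨by simp, by simp⟩
    | succ j =>
      simp only [List.take_succ_cons, List.all_cons, List.length_cons, pvRunLen]
      by_cases hv : v = -1
      · have hiff := ih j
        simp only [hv, beq_self_eq_true, Bool.true_and]
        constructor
        · rintro ⟨ha, hl⟩
          have : ((j : Int) ≤ pvRunLen rest) := hiff.mp ⟨ha, by push_cast at hl ⊢; omega⟩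
          push_cast; omega
        · intro h
          have hj : (j : Int) ≤ pvRunLen rest := by push_cast at h; omega
          obtain ⟨ha, hl⟩ := hiff.mpr hj
          exact ⟨ha, by push_cast at hl ⊢; omega⟩
      · have hb : (v == (-1 : Int)) = false := by simp [hv]
        simp only [hb, Bool.false_and, if_neg hv]
        constructor
        · rintro ⟨h, -⟩; exact absurd h (by simp)
        · intro h; omega
  
lemma pvA_loop_neg (file_map : List Int) (size before : Int) (hs : size < 0) :
    ∀ (rest : List Int) (idx : Int), pvA_loop file_map size before rest idx = none := by
  intro rest
  induction rest with
  | nil => intro idx; simp [pvA_loop]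
  | cons f r ih =>
    intro idx
    simp only [pvA_loop]
    split
    · rfl
    · split
      · have hlen : ¬ ((PySem.List.slice file_map (some idx) (some (idx + size))).length : Int) = size := by
          have : (0 : Int) ≤ ((PySem.List.slice file_map (some idx) (some (idx + size))).length : Int) := by positivity
          omega
        rw [if_neg (by tauto)]
        exact ih (idx + 1)
      · exact ih (idx + 1)

lemma pvMain (file_map : List Int) (size before : Int) (k : Nat) (hk : size = (k : Int)) :
    ∀ (rest : List Int) (i : Nat), file_map.drop i = rest →
      pvA_loop file_map size before rest (i : Int) = pvB_scan size before (pvB_run rest) (i : Int) := by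
  subst hk
  intro rest
  induction rest with
  | nil =>
    intro i _
    simp only [pvA_loop, pvB_run, pvB_scan]
    split
    · rfl
    · rw [if_neg (show ¬ ((0:Int) < 0 ∧ (k : Int) ≤ (0:Int)) by omega)]
  | cons f r ih =>
    intro i hdrop
    have hdrop' : file_map.drop (i + 1) = r := by
      rw [← List.drop_drop, hdrop]; rfl
    have hchunk : PySem.List.slice file_map (some (i : Int)) (some ((i : Int) + (k : Int))) = (f :: r).take k := by
      rw [PySem.List.slice_natCast_add, hdrop]
    have hstep : ((i : Int) + 1) = ((i + 1 : Nat) : Int) := by push_cast; ring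
    simp only [pvA_loop, pvB_run, pvB_scan, pvB_run_head]
    split
    · rfl
    · by_cases hf : f = -1
      · simp only [if_pos hf]
        have hrun : pvRunLen (f :: r) = pvRunLen r + 1 := by simp [pvRunLen, hf]
        have hiff := pvRunLen_ge_iff (f :: r) k
        rw [hrun] at hiff
        rw [hchunk]
        by_cases hc : (((f :: r).take k).all (fun space => space == (-1 : Int))) = true ∧ (((f :: r).take k).length : Int) = (k : Int)
        · rw [if_pos hc, if_pos ⟨by have := pvRunLen_nonneg r; omega, hiff.mp hc⟩]
        · have hlt : ¬ (k : Int) ≤ pvRunLen r + 1 := fun h => hc (hiff.mpr h)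
          rw [if_neg hc, if_neg (fun h => hlt h.2)]
          rw [hstep]
          exact ih (i + 1) hdrop'
      · simp only [if_neg hf]
        rw [if_neg (show ¬ ((0:Int) < 0 ∧ (k : Int) ≤ (0:Int)) by omega)]
        rw [hstep]
        exact ih (i + 1) hdrop'

-- ===== VERDICT (by name: the statement is the Claim_ definition above) =====
theorem find_first_empty_space_before_spec : Claim_equal_find_first_empty_space_before := by
  intro file_map size before _
  unfold Spec_find_first_empty_space_before find_first_empty_space_before find_first_empty_space_before_alt
  by_cases hs : size < 0
  · rw [if_pos hs]
    exact pvA_loop_neg file_map size before hs file_map 0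
  · rw [if_neg hs]
    have hk : size = ((size.toNat : Nat) : Int) := by omega
    exact pvMain file_map size before size.toNat hk file_map 0 rfl
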